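-- pv_equiv track=rewrite | github.com/xiema/competitive | codeforces/samegcd.py | hipow
-- ===== SOURCE A (Python) =====
-- def hipow(n, x):
--     if n%x:
--         return 1,n
--     ret,n = hipow(n,x*x)
--     if n%x == 0:
--         ret*=x
--         n//=x
--     return ret,n
-- ===== SOURCE B (Python) =====
-- def hipow(n, x):
--     ret = 1
--     while n % x == 0:
--         n //= x
--         ret *= x
--     return ret, n
-- ===== Notes on version B (the rewrite author's own statement) =====
-- stated objective: simpler
-- what changed: Replaced the recursive repeated-squaring descent (recurse on x*x, then peel one extra factor) with a plain linear valuation loop that divides out one factor of x at a time with a running product accumulator.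
import Mathlib
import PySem

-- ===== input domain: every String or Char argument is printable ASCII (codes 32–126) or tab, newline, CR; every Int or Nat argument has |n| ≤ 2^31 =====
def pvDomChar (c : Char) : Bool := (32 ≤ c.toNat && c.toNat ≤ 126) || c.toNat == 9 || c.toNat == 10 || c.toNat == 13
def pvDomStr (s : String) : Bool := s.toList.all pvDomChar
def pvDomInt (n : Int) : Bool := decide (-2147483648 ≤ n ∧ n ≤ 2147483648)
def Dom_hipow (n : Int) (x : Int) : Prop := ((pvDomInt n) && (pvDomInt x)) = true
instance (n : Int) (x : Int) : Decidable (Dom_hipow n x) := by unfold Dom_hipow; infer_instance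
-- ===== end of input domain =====

-- B replaces A's repeated-squaring recursion with a plain linear valuation loop (simpler; same results).

-- ===== PORT A =====
-- A recurses on x*x; on Dom ∩ Pre the recursion depth is at most 64, so fuel 64 is exact there.
def hipowAux : Nat → Int → Int → Int × Int
  | 0, n, _ => (1, n)
  | f+1, n, x =>
    if PySem.Int.mod n x ≠ 0 then (1, n)
    else
      let p := hipowAux f n (x*x)
      if PySem.Int.mod p.2 x = 0 then (p.1 * x, PySem.Int.floordiv p.2 x)
      else p

def hipow (n : Int) (x : Int) : Int × Int := hipowAux 64 n x

-- ===== PORT B =====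
-- B's while-loop; on Dom ∩ Pre the loop runs at most 64 iterations, so fuel 64 is exact there.
def hipowLoop : Nat → Int → Int → Int → Int × Int
  | 0, ret, n, _ => (ret, n)
  | f+1, ret, n, x =>
    if PySem.Int.mod n x = 0 then hipowLoop f (ret * x) (PySem.Int.floordiv n x) x
    else (ret, n)

def hipow_alt (n : Int) (x : Int) : Int × Int := hipowLoop 64 1 n x

-- ===== PRECONDITION & SPEC =====
-- Pre_ excludes exactly the inputs on which Python A never returns: x = 0 (ZeroDivisionError)
-- and n = 0 or x = ±1 (unbounded recursion, RecursionError); B also raises or loops forever there.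
def Pre_hipow (n : Int) (x : Int) : Prop := n ≠ 0 ∧ 2 ≤ |x|
instance (n : Int) (x : Int) : Decidable (Pre_hipow n x) := by unfold Pre_hipow; infer_instance
def pvWitness_hipow : Int × Int := (12, 2)

def Spec_hipow (n : Int) (x : Int) (out : Int × Int) : Prop := out = hipow_alt n x
instance (n : Int) (x : Int) (out : Int × Int) : Decidable (Spec_hipow n x out) := by unfold Spec_hipow; infer_instance

-- ===== CLAIM (what is proved, stated in full; the proofs are below) =====
def Claim_equal_hipow : Prop := ∀ (n : Int) (x : Int), Dom_hipow n x → Pre_hipow n x → Spec_hipow n x (hipow n x)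

-- ===== LEMMAS AND PROOFS =====

-- exact division: if q * x = n (and x ≠ 0) then Python n // x = q
lemma fd_exact (n x q : Int) (hx : x ≠ 0) (h : q * x = n) : PySem.Int.floordiv n x = q := by
  have hm : PySem.Int.mod n x = 0 := (PySem.Int.mod_eq_zero_iff_dvd n x).2 ⟨q, by linarith [h]⟩
  have hfm := PySem.Int.floordiv_mul_add_mod n x
  rw [hm, add_zero] at hfm
  exact mul_right_cancel₀ hx (hfm.trans h.symm)

lemma dvd_mod_zero (n x : Int) (h : x ∣ n) : PySem.Int.mod n x = 0 :=
  (PySem.Int.mod_eq_zero_iff_dvd n x).2 h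

-- dividing out one factor keeps n nonzero and shrinks the power bound by one
lemma fd_step (n x : Int) (f : Nat) (hn : n ≠ 0) (hx : 2 ≤ |x|)
    (hd : x ∣ n) (hb : |n| < |x| ^ (f + 1)) :
    PySem.Int.floordiv n x ≠ 0 ∧ |PySem.Int.floordiv n x| < |x| ^ f := by
  obtain ⟨c, hc⟩ := hd
  have hx0 : x ≠ 0 := by intro h; rw [h] at hx; simp at hx
  have hfd : PySem.Int.floordiv n x = c := fd_exact n x c hx0 (by linarith [hc])
  have hc0 : c ≠ 0 := by rintro rfl; simp at hc; exact hn hc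
  have habs : |n| = |c| * |x| := by rw [hc, abs_mul]; ring
  refine ⟨by rw [hfd]; exact hc0, ?_⟩
  rw [hfd]
  have hxpos : (0:Int) < |x| := by linarith
  have : |c| * |x| < |x| ^ f * |x| := by
    rw [← habs, pow_succ] at *
    linarith [hb]
  exact lt_of_mul_lt_mul_right this (le_of_lt hxpos)

-- if x does not divide n the loop exits immediately, for any fuel
lemma loop_not_dvd (f : Nat) (r n x : Int) (h : ¬ x ∣ n) : hipowLoop f r n x = (r, n) := by
  cases f with
  | zero => rfl
  | succ f =>
    have : PySem.Int.mod n x ≠ 0 := fun hm => h ((PySem.Int.mod_eq_zero_iff_dvd n x).1 hm)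
    simp [hipowLoop, this]

-- fuel irrelevance: any fuel exceeding the valuation gives the same answer
lemma alt_fuel (f : Nat) : ∀ (g : Nat) (r n x : Int), n ≠ 0 → 2 ≤ |x| →
    |n| < |x| ^ f → |n| < |x| ^ g → hipowLoop f r n x = hipowLoop g r n x := by
  induction f with
  | zero =>
    intro g r n x hn hx hf hg
    simp at hf
    exact absurd hf (by have := abs_pos.2 hn; omega)
  | succ f ih =>
    intro g r n x hn hx hf hg
    by_cases hd : x ∣ n
    · cases g with
      | zero =>
        simp at hg
        exact absurd hg (by have := abs_pos.2 hn; omega)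
      | succ g =>
        obtain ⟨hn', hf'⟩ := fd_step n x f hn hx hd hf
        obtain ⟨_, hg'⟩ := fd_step n x g hn hx hd hg
        simp only [hipowLoop, dvd_mod_zero n x hd, if_pos]
        exact ih g (r * x) (PySem.Int.floordiv n x) x hn' hx hf' hg'
    · rw [loop_not_dvd, loop_not_dvd] <;> exact hd

-- crux: one pass of the x*x-loop plus one optional extra division equals the x-loop
lemma crux (f : Nat) : ∀ (r n x : Int), n ≠ 0 → 2 ≤ |x| → |n| < |x*x| ^ f →
    (let p := hipowLoop f r n (x*x);
     if PySem.Int.mod p.2 x = 0 then (p.1 * x, PySem.Int.floordiv p.2 x) else p)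
    = hipowLoop (2*f+1) r n x := by
  induction f with
  | zero =>
    intro r n x hn hx hb
    simp at hb
    exact absurd hb (by have := abs_pos.2 hn; omega)
  | succ f ih =>
    intro r n x hn hx hb
    have hx0 : x ≠ 0 := by intro h; rw [h] at hx; simp at hx
    have hxx : 2 ≤ |x*x| := by rw [abs_mul]; nlinarith
    have hxx0 : x * x ≠ 0 := by intro h; rw [h] at hxx; simp at hxx
    by_cases h2 : (x*x) ∣ n
    · -- two steps of the x-loop for one step of the x*x-loop
      obtain ⟨c, hc⟩ := h2
      have hfd2 : PySem.Int.floordiv n (x*x) = c := fd_exact n (x*x) c hxx0 (by linarith [hc])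
      obtain ⟨hn', hb'⟩ := fd_step n (x*x) f hn hxx ⟨c, hc⟩ hb
      rw [hfd2] at hn' hb'
      have hd1 : x ∣ n := ⟨x*c, by rw [hc]; ring⟩
      have hfd1 : PySem.Int.floordiv n x = c * x := fd_exact n x (c*x) hx0 (by rw [hc]; ring)
      have hdcx : x ∣ c * x := ⟨c, mul_comm c x⟩
      have hfdcx : PySem.Int.floordiv (c*x) x = c := fd_exact (c*x) x c hx0 rfl
      have hL : hipowLoop (f+1) r n (x*x) = hipowLoop f (r*(x*x)) c (x*x) := by
        simp [hipowLoop, dvd_mod_zero n (x*x) ⟨c, hc⟩, hfd2]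
      have hR : hipowLoop (2*(f+1)+1) r n x = hipowLoop (2*f+1) (r*(x*x)) c x := by
        rw [show 2*(f+1)+1 = (2*f+1)+1+1 from by ring]
        simp only [hipowLoop, dvd_mod_zero n x hd1, if_pos, hfd1,
          dvd_mod_zero (c*x) x hdcx, hfdcx]
        rw [show r * x * x = r * (x*x) from by ring]
      simp only [hL, hR]
      exact ih (r*(x*x)) c x hn' hx hb'
    · -- x*x does not divide n: at most one more factor of x
      have hL : hipowLoop (f+1) r n (x*x) = (r, n) := loop_not_dvd (f+1) r n (x*x) h2
      by_cases hd1 : x ∣ n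
      · obtain ⟨c, hc⟩ := hd1
        have hfd1 : PySem.Int.floordiv n x = c := fd_exact n x c hx0 (by linarith [hc])
        have hnd : ¬ x ∣ c := by
          rintro ⟨k, rfl⟩
          exact h2 ⟨k, by rw [hc]; ring⟩
        have hR : hipowLoop (2*(f+1)+1) r n x = (r*x, c) := by
          rw [show 2*(f+1)+1 = (2*f+2)+1 from by ring]
          simp only [hipowLoop, dvd_mod_zero n x ⟨c, hc⟩, if_pos, hfd1]
          exact loop_not_dvd (2*f+2) (r*x) c x hnd
        simp only [hL, hR, dvd_mod_zero n x ⟨c, hc⟩, if_pos, hfd1]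
      · have hR : hipowLoop (2*(f+1)+1) r n x = (r, n) := loop_not_dvd _ r n x hd1
        have hm1 : PySem.Int.mod n x ≠ 0 :=
          fun hm => hd1 ((PySem.Int.mod_eq_zero_iff_dvd n x).1 hm)
        simp only [hL, hR, ite_eq_right_iff]
        intro h; exact absurd h hm1

-- main: A's recursion equals B's loop, given enough power bound
lemma A_eq (f : Nat) : ∀ (n x : Int), n ≠ 0 → 2 ≤ |x| → |n| < |x| ^ (2^f) →
    hipowAux f n x = hipowLoop (2^(f+1)) 1 n x := by
  induction f with
  | zero =>
    intro n x hn hx hb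
    simp only [pow_zero, pow_one] at hb
    have hnd : ¬ x ∣ n := by
      intro hd
      have : |x| ∣ |n| := (abs_dvd_abs x n).2 hd
      have := Int.le_of_dvd (abs_pos.2 hn) this
      omega
    rw [loop_not_dvd _ _ _ _ hnd]
    rfl
  | succ f ih =>
    intro n x hn hx hb
    have hx0 : x ≠ 0 := by intro h; rw [h] at hx; simp at hx
    have hxx : 2 ≤ |x*x| := by rw [abs_mul]; nlinarith
    have hbb : |n| < |x*x| ^ (2^f) := by
      have hxe : |x*x| ^ (2^f) = |x| ^ (2^(f+1)) := by
        rw [abs_mul, ← pow_two, ← pow_mul,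
          show 2 * 2^f = 2^(f+1) from by rw [pow_succ, Nat.mul_comm]]
      rw [hxe]; exact hb
    by_cases hd : x ∣ n
    · simp only [hipowAux, dvd_mod_zero n x hd, ne_eq, not_true_eq_false, ite_false]
      rw [ih n (x*x) hn hxx hbb]
      rw [alt_fuel (2^(f+1)) (2^f) 1 n (x*x) hn hxx
        (by calc |n| < |x*x| ^ (2^f) := hbb
              _ ≤ |x*x| ^ (2^(f+1)) := pow_le_pow_right₀ (by omega) (Nat.pow_le_pow_right (by omega) (by omega)))
        hbb]
      rw [crux (2^f) 1 n x hn hx hbb]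
      apply alt_fuel _ _ _ _ _ hn hx
      · calc |n| < |x| ^ (2^(f+1)) := hb
          _ ≤ |x| ^ (2*2^f+1) := pow_le_pow_right₀ (by omega) (by rw [pow_succ]; omega)
      · calc |n| < |x| ^ (2^(f+1)) := hb
          _ ≤ |x| ^ (2^(f+2)) := pow_le_pow_right₀ (by omega) (Nat.pow_le_pow_right (by omega) (by omega))
    · have hm : PySem.Int.mod n x ≠ 0 :=
        fun hm => hd ((PySem.Int.mod_eq_zero_iff_dvd n x).1 hm)
      rw [loop_not_dvd _ _ _ _ hd]
      simp only [hipowAux, hm, ne_eq, not_false_eq_true, if_true]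

-- ===== VERDICT (by name: the statement is the Claim_ definition above) =====
theorem hipow_spec : Claim_equal_hipow := by
  intro n x hdom hpre
  obtain ⟨hn, hx⟩ := hpre
  have hdom' : |n| ≤ 2^31 := by
    unfold Dom_hipow pvDomInt at hdom
    simp only [Bool.and_eq_true, decide_eq_true_eq] at hdom
    rw [abs_le]; constructor <;> omega
  have hb64 : |n| < |x| ^ 64 := by
    calc |n| ≤ 2^31 := hdom'
      _ < 2^64 := by norm_num
      _ ≤ |x|^64 := pow_le_pow_left₀ (by norm_num) hx 64
  have hbbig : |n| < |x| ^ (2^64) := by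
    calc |n| < |x| ^ 64 := hb64
      _ ≤ |x| ^ (2^64) := pow_le_pow_right₀ (by omega) (by norm_num)
  unfold Spec_hipow hipow hipow_alt
  rw [A_eq 64 n x hn hx hbbig]
  exact alt_fuel _ _ _ _ _ hn hx
    (by calc |n| < |x|^64 := hb64
          _ ≤ |x|^(2^65) := pow_le_pow_right₀ (by omega) (by norm_num)) hb64
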